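-- pv_equiv track=rewrite | github.com/wonglaitung/fortune | .iflow/skills/anomaly-detector/anomaly_detector/anomaly_integrator.py | _get_overall_severity
-- ===== SOURCE A (Python) =====
-- from typing import Dict, List
--
-- def _get_overall_severity(anomalies: List[Dict]) -> str:
--     """
--     Get overall severity from multiple anomalies.
--
--     Args:
--         anomalies: List of anomaly dicts
--
--     Returns:
--         Overall severity level ('high', 'medium', 'low')
--     """
--     if not anomalies:
--         return None
--
--     # Check for high severity
--     if any(a['severity'] == 'high' for a in anomalies):
--         return 'high'
--
--     # Check for medium severity
--     if any(a['severity'] == 'medium' for a in anomalies):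
--         return 'medium'
--
--     # Default to low
--     return 'low'
-- ===== SOURCE B (Python) =====
-- from typing import Dict, List
--
-- def _get_overall_severity(anomalies: List[Dict]) -> str:
--     """Single forward pass: return 'high' immediately, remember 'medium', default 'low'."""
--     if not anomalies:
--         return None
--     saw_medium = False
--     for a in anomalies:
--         s = a['severity']
--         if s == 'high':
--             return 'high'
--         if s == 'medium':
--             saw_medium = True
--     return 'medium' if saw_medium else 'low'
-- ===== Notes on version B (the rewrite author's own statement) =====
-- stated objective: alternative
-- what changed: Replaces A's two separate any() scans over the list with a single forward loop that returns 'high' at the first high anomaly and tracks a saw_medium flag, deciding 'medium'/'low' after the pass.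
import Mathlib
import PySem

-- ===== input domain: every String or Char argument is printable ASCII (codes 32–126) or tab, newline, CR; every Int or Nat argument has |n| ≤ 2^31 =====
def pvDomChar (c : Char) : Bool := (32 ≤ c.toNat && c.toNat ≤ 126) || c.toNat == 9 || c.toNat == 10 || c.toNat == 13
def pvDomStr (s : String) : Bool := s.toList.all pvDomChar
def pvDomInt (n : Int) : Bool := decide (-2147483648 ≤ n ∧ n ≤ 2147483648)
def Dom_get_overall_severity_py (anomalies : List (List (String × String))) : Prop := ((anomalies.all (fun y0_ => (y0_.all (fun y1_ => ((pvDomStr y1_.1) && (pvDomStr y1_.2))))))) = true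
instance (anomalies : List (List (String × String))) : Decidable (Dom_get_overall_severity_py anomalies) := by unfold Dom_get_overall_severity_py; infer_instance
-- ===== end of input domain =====

-- B replaces A's two any() scans with one forward pass (return 'high' at once, remember 'medium'); alternative decomposition, same cost.


-- ===== PORT A =====
-- a['severity'] : first-match lookup in the association list (exact for a Python dict)
def pvSev (a : List (String × String)) : Option String :=
  (a.find? (fun p => p.1 == "severity")).map (·.2)

-- any(a['severity'] == v for a in anomalies), scanning left to right
def pvAnySev (anomalies : List (List (String × String))) (v : String) : Bool :=
  match anomalies with
  | [] => false
  | a :: rest => if pvSev a == some v then true else pvAnySev rest v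

def get_overall_severity_py (anomalies : List (List (String × String))) : Option String :=
  if anomalies = [] then none
  else if pvAnySev anomalies "high" then some "high"
  else if pvAnySev anomalies "medium" then some "medium"
  else some "low"

-- ===== PORT B =====
-- single forward loop carrying the saw_medium flag
def pvLoopB (anomalies : List (List (String × String))) (sawMedium : Bool) : Option String :=
  match anomalies with
  | [] => some (if sawMedium then "medium" else "low")
  | a :: rest =>
    let s := pvSev a
    if s == some "high" then some "high"
    else pvLoopB rest (sawMedium || s == some "medium")

def get_overall_severity_py_alt (anomalies : List (List (String × String))) : Option String :=
  if anomalies = [] then none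
  else pvLoopB anomalies false

-- ===== PRECONDITION & SPEC =====
-- Pre_ excludes exactly the inputs on which Python A raises KeyError: a dict without a
-- 'severity' key reached before any 'high' anomaly (B raises at the same element there).
def Pre_get_overall_severity_py (anomalies : List (List (String × String))) : Prop :=
  ∀ i ∈ List.range anomalies.length,
    (anomalies.getD i []).find? (fun p => p.1 == "severity") = none →
    ∃ j ∈ List.range i, ((anomalies.getD j []).find? (fun p => p.1 == "severity")).map (·.2) = some "high"
instance (anomalies : List (List (String × String))) : Decidable (Pre_get_overall_severity_py anomalies) := by unfold Pre_get_overall_severity_py; infer_instance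
def pvWitness_get_overall_severity_py : (List (List (String × String))) := [[("severity", "medium")], [("severity", "low")]]
def Spec_get_overall_severity_py (anomalies : List (List (String × String))) (out : Option String) : Prop := out = get_overall_severity_py_alt anomalies
instance (anomalies : List (List (String × String))) (out : Option String) : Decidable (Spec_get_overall_severity_py anomalies out) := by unfold Spec_get_overall_severity_py; infer_instance

-- ===== CLAIM (what is proved, stated in full; the proofs are below) =====
def Claim_equal_get_overall_severity_py : Prop := ∀ (anomalies : List (List (String × String))), Dom_get_overall_severity_py anomalies → Pre_get_overall_severity_py anomalies → Spec_get_overall_severity_py anomalies (get_overall_severity_py anomalies)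

-- ===== LEMMAS AND PROOFS =====
-- B's loop, characterised by A's two scans (holds for every list, any flag)
theorem pvLoopB_eq (anomalies : List (List (String × String))) (b : Bool) :
    pvLoopB anomalies b =
      if pvAnySev anomalies "high" then some "high"
      else some (if b || pvAnySev anomalies "medium" then "medium" else "low") := by
  induction anomalies generalizing b with
  | nil => simp [pvLoopB, pvAnySev]
  | cons a rest ih =>
    simp only [pvLoopB, pvAnySev]
    by_cases h : pvSev a == some "high"
    · simp [h]
    · simp only [h, ih]
      by_cases hm : pvSev a == some "medium" <;> simp [hm]

-- ===== VERDICT (by name: the statement is the Claim_ definition above) =====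
theorem get_overall_severity_py_spec : Claim_equal_get_overall_severity_py := by
  intro anomalies _ _
  unfold Spec_get_overall_severity_py get_overall_severity_py get_overall_severity_py_alt
  by_cases h : anomalies = []
  · simp [h]
  · simp only [h, if_false, pvLoopB_eq, Bool.false_or]
    by_cases h1 : pvAnySev anomalies "high" <;> by_cases h2 : pvAnySev anomalies "medium" <;>
      simp [h1, h2]
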